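-- pv_equiv track=rewrite | github.com/DeanHe/Practice | LeetCodePython/CountNoZeroPairsThatSumToN.py | countNoZeroPairs
-- ===== SOURCE A (Python) =====
-- from functools import cache
--
-- def countNoZeroPairs(n: int) -> int:
--     res = 0
--     n_str = str(n)
--     sz = len(n_str)
--     digits = []
--     for c in n_str[::-1]:
--         digits.append(int(c))
--
--     @cache
--     def dfs(i, carry, len_A, len_B):
--         if i == sz:
--             if carry == 0:
--                 return 1
--             else:
--                 return 0
--         start_num_A = 1 if i < len_A else 0
--         end_num_A = 9 if i < len_A else 0
--         start_num_B = 1 if i < len_B else 0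
--         end_num_B = 9 if i < len_B else 0
--         ways = 0
--         for a in range(start_num_A, end_num_A + 1):
--             for b in range(start_num_B, end_num_B + 1):
--                 cur = a + b + carry
--                 if cur % 10 == digits[i]:
--                     ways += dfs(i + 1, cur // 10, len_A, len_B)
--         return ways
--
--     for len_A in range(1, sz + 1):
--         for len_B in range(1, sz + 1):
--             res += dfs(0, 0, len_A, len_B)
--     return res
-- ===== SOURCE B (Python) =====
-- def countNoZeroPairs(n: int) -> int:
--     s = str(n)
--     sz = len(s)
--     digits = [int(c) for c in reversed(s)]
--
--     def run(len_A, len_B):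
--         # bottom-up: dp[carry] = ways to complete positions >= i given carry
--         dp = (1, 0)
--         for i in range(sz - 1, -1, -1):
--             lo_a, hi_a = (1, 9) if i < len_A else (0, 0)
--             lo_b, hi_b = (1, 9) if i < len_B else (0, 0)
--             dp = tuple(
--                 sum(dp[(a + b + c) // 10]
--                     for a in range(lo_a, hi_a + 1)
--                     for b in range(lo_b, hi_b + 1)
--                     if (a + b + c) % 10 == digits[i])
--                 for c in (0, 1))
--         return dp[0]
--
--     return sum(run(la, lb) for la in range(1, sz + 1) for lb in range(1, sz + 1))
-- ===== Notes on version B (the rewrite author's own statement) =====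
-- stated objective: alternative
-- what changed: Replaces A's memoized top-down dfs recursion over (i, carry) with an explicit bottom-up DP that sweeps the digit positions once per (len_A, len_B) pair, maintaining only the 2-cell table over the reachable carries 0 and 1.
import Mathlib
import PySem

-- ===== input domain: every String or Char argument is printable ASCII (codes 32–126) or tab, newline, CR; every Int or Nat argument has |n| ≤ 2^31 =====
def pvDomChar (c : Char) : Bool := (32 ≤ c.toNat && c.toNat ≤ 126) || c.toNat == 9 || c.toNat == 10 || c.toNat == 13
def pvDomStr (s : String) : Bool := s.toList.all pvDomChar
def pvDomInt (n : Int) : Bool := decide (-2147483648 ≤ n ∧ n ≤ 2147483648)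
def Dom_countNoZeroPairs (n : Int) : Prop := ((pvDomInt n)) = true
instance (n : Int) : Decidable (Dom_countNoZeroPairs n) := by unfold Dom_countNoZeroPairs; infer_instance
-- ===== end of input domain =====

-- B replaces A's memoized top-down dfs recursion by an explicit bottom-up DP over the
-- two reachable carries (an 'alternative' decomposition, no speed claim).

-- ===== PORT A =====
-- int(c) for a decimal digit character c (used by both ports); exact on '0'..'9'
-- (Pre_ excludes negative n, on whose '-' character Python's int(c) raises ValueError)
def pvDigitVal (c : Char) : Int := (c.toNat : Int) - 48

-- A's @cache threaded explicitly: the memo maps the call key (i, carry, len_A, len_B) to dfs's value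
def dfsA (lenA lenB : Int) :
    List Int → Int → Int → PySem.Dict (Int × Int × Int × Int) Int →
      Int × PySem.Dict (Int × Int × Int × Int) Int
  | [], i, carry, memo =>
    match memo.get? (i, carry, lenA, lenB) with
    | some v => (v, memo)
    | none =>
      let v : Int := if carry = 0 then 1 else 0
      (v, memo.insert (i, carry, lenA, lenB) v)
  | d :: rest, i, carry, memo =>
    match memo.get? (i, carry, lenA, lenB) with
    | some v => (v, memo)
    | none =>
      let startA : Int := if i < lenA then 1 else 0
      let endA : Int := if i < lenA then 9 else 0
      let startB : Int := if i < lenB then 1 else 0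
      let endB : Int := if i < lenB then 9 else 0
      let r := (PySem.List.pyRange startA (endA + 1) 1).foldl (fun st a =>
        (PySem.List.pyRange startB (endB + 1) 1).foldl (fun st b =>
          let cur := a + b + carry
          if PySem.Int.mod cur 10 = d then
            let vm := dfsA lenA lenB rest (i + 1) (PySem.Int.floordiv cur 10) st.2
            (st.1 + vm.1, vm.2)
          else st) st) ((0 : Int), memo)
      (r.1, r.2.insert (i, carry, lenA, lenB) r.1)

def countNoZeroPairs (n : Int) : Int :=
  let nStr := PySem.Int.toChars n
  let sz : Int := nStr.length
  let digits := nStr.reverse.map pvDigitVal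
  ((PySem.List.pyRange 1 (sz + 1) 1).foldl (fun st lenA =>
    (PySem.List.pyRange 1 (sz + 1) 1).foldl (fun st lenB =>
      let vm := dfsA lenA lenB digits 0 0 st.2
      (st.1 + vm.1, vm.2)) st) ((0 : Int), PySem.Dict.empty)).1


-- ===== PORT B =====
-- sum(dp[(a+b+c)//10] for a .. for b .. if (a+b+c)%10 == d); dp is the 2-cell table
-- (dp[0], dp[1]) — the only reachable carries, since (a+b+c)//10 ∈ {0,1}
def waysB (loA hiA loB hiB d c : Int) (dp : Int × Int) : Int :=
  ((PySem.List.pyRange loA (hiA + 1) 1).map (fun a =>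
    ((PySem.List.pyRange loB (hiB + 1) 1).map (fun b =>
      if PySem.Int.mod (a + b + c) 10 = d then
        (if PySem.Int.floordiv (a + b + c) 10 = 0 then dp.1 else dp.2)
      else 0)).sum)).sum

-- the i-loop of B's run(): dp at position i from dp at position i+1 (digits[i:] is the arg)
def dpRunB (lenA lenB : Int) : List Int → Int → Int × Int
  | [], _i => (1, 0)
  | d :: rest, i =>
    let dp := dpRunB lenA lenB rest (i + 1)
    let loA : Int := if i < lenA then 1 else 0
    let hiA : Int := if i < lenA then 9 else 0
    let loB : Int := if i < lenB then 1 else 0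
    let hiB : Int := if i < lenB then 9 else 0
    (waysB loA hiA loB hiB d 0 dp, waysB loA hiA loB hiB d 1 dp)

def countNoZeroPairs_alt (n : Int) : Int :=
  let s := PySem.Int.toChars n
  let sz : Int := s.length
  let digits := s.reverse.map pvDigitVal
  ((PySem.List.pyRange 1 (sz + 1) 1).map (fun la =>
    ((PySem.List.pyRange 1 (sz + 1) 1).map (fun lb =>
      (dpRunB la lb digits 0).1)).sum)).sum


-- ===== PRECONDITION & SPEC =====
-- Pre_ excludes exactly the negative n, on which Python A raises ValueError
-- (int('-') while converting the reversed digit string); B raises there too.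
def Pre_countNoZeroPairs (n : Int) : Prop := 0 ≤ n
instance (n : Int) : Decidable (Pre_countNoZeroPairs n) := by unfold Pre_countNoZeroPairs; infer_instance
def pvWitness_countNoZeroPairs : Int := 10

def Spec_countNoZeroPairs (n : Int) (out : Int) : Prop := out = countNoZeroPairs_alt n
instance (n : Int) (out : Int) : Decidable (Spec_countNoZeroPairs n out) := by unfold Spec_countNoZeroPairs; infer_instance

-- ===== CLAIM (what is proved, stated in full; the proofs are below) =====
def Claim_equal_countNoZeroPairs : Prop := ∀ (n : Int), Dom_countNoZeroPairs n → Pre_countNoZeroPairs n → Spec_countNoZeroPairs n (countNoZeroPairs n)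

-- ===== LEMMAS AND PROOFS =====

-- pure (uncached) value of A's dfs — proof-only helper
def dfsPure (lenA lenB : Int) : List Int → Int → Int → Int
  | [], _i, carry => if carry = 0 then 1 else 0
  | d :: rest, i, carry =>
    let startA : Int := if i < lenA then 1 else 0
    let endA : Int := if i < lenA then 9 else 0
    let startB : Int := if i < lenB then 1 else 0
    let endB : Int := if i < lenB then 9 else 0
    (PySem.List.pyRange startA (endA + 1) 1).foldl (fun ways a =>
      (PySem.List.pyRange startB (endB + 1) 1).foldl (fun ways b =>
        let cur := a + b + carry
        if PySem.Int.mod cur 10 = d then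
          ways + dfsPure lenA lenB rest (i + 1) (PySem.Int.floordiv cur 10)
        else ways) ways) 0

-- memo invariant: every cached entry is the pure dfs value of the corresponding suffix
def GoodA (digits : List Int) (memo : PySem.Dict (Int × Int × Int × Int) Int) : Prop :=
  ∀ j c la lb v, memo.get? (j, c, la, lb) = some v →
    v = dfsPure la lb (digits.drop j.toNat) j c

-- the loop bodies of dfsA / dfsPure, named so the simulation lemmas can talk about them
def stepInner (lenA lenB i carry d a : Int) (rest : List Int) :
    Int × PySem.Dict (Int × Int × Int × Int) Int → Int → Int × PySem.Dict (Int × Int × Int × Int) Int :=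
  fun st b =>
    if PySem.Int.mod (a + b + carry) 10 = d then
      (st.1 + (dfsA lenA lenB rest (i + 1) (PySem.Int.floordiv (a + b + carry) 10) st.2).1,
       (dfsA lenA lenB rest (i + 1) (PySem.Int.floordiv (a + b + carry) 10) st.2).2)
    else st

def pstepInner (lenA lenB i carry d a : Int) (rest : List Int) : Int → Int → Int :=
  fun w b =>
    if PySem.Int.mod (a + b + carry) 10 = d then
      w + dfsPure lenA lenB rest (i + 1) (PySem.Int.floordiv (a + b + carry) 10)
    else w

def stepOuter (lenA lenB i carry d : Int) (rest : List Int) :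
    Int × PySem.Dict (Int × Int × Int × Int) Int → Int → Int × PySem.Dict (Int × Int × Int × Int) Int :=
  fun st a =>
    (PySem.List.pyRange (if i < lenB then 1 else 0) ((if i < lenB then 9 else 0) + 1) 1).foldl
      (stepInner lenA lenB i carry d a rest) st

def pstepOuter (lenA lenB i carry d : Int) (rest : List Int) : Int → Int → Int :=
  fun w a =>
    (PySem.List.pyRange (if i < lenB then 1 else 0) ((if i < lenB then 9 else 0) + 1) 1).foldl
      (pstepInner lenA lenB i carry d a rest) w

-- one fold step threading (acc, memo) simulates the memo-free fold
lemma pv_fold_sim {α M : Type} (Good : M → Prop) :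
    ∀ (l : List α) (step : Int × M → α → Int × M) (pstep : Int → α → Int),
      (∀ x ∈ l, ∀ w m, Good m → (step (w, m) x).1 = pstep w x ∧ Good (step (w, m) x).2) →
      ∀ (w : Int) (m : M), Good m →
        (l.foldl step (w, m)).1 = l.foldl pstep w ∧ Good (l.foldl step (w, m)).2
  | [], _step, _pstep, _h, _w, _m, hm => ⟨rfl, hm⟩
  | x :: xs, step, pstep, h, w, m, hm => by
      obtain ⟨h1, h2⟩ := h x List.mem_cons_self w m hm
      rcases hq : step (w, m) x with ⟨w', m'⟩
      rw [hq] at h1 h2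
      have ih := pv_fold_sim Good xs step pstep
        (fun y hy => h y (List.mem_cons_of_mem _ hy)) w' m' h2
      simp only [List.foldl_cons, hq]
      exact ⟨by rw [ih.1, ← h1], ih.2⟩

lemma dfsA_sim (digits : List Int) :
    ∀ (ds : List Int) (lenA lenB i carry : Int) (memo : PySem.Dict (Int × Int × Int × Int) Int),
      0 ≤ i → ds = digits.drop i.toNat → GoodA digits memo →
      (dfsA lenA lenB ds i carry memo).1 = dfsPure lenA lenB ds i carry ∧
      GoodA digits (dfsA lenA lenB ds i carry memo).2
  | [], lenA, lenB, i, carry, memo, _hi, hds, hg => by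
      rcases hget : memo.get? (i, carry, lenA, lenB) with _ | v
      · simp only [dfsA, hget]
        refine ⟨by simp [dfsPure], ?_⟩
        intro j c la lb v' hv'
        rw [PySem.Dict.get?_insert] at hv'
        by_cases hk : (j, c, la, lb) = (i, carry, lenA, lenB)
        · rw [if_pos hk] at hv'
          obtain ⟨rfl, rfl, rfl, rfl⟩ : j = i ∧ c = carry ∧ la = lenA ∧ lb = lenB := by
            injection hk with h1 h2; injection h2 with h2 h3; injection h3 with h3 h4
            exact ⟨h1, h2, h3, h4⟩
          rw [← hds]
          simpa [dfsPure] using hv'.symm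
        · rw [if_neg hk] at hv'
          exact hg j c la lb v' hv'
      · simp only [dfsA, hget]
        exact ⟨by rw [hds]; exact hg i carry lenA lenB v hget, hg⟩
  | d :: rest, lenA, lenB, i, carry, memo, hi, hds, hg => by
      have hrest : rest = digits.drop (i + 1).toNat := by
        have h1 : (i + 1).toNat = i.toNat + 1 := by omega
        have h2 := congrArg List.tail hds.symm
        simpa [h1, List.tail_drop] using h2.symm
      rcases hget : memo.get? (i, carry, lenA, lenB) with _ | v
      · have hstep : ∀ a ∈ PySem.List.pyRange (if i < lenA then 1 else 0) ((if i < lenA then 9 else 0) + 1) 1,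
            ∀ w m, GoodA digits m →
            (stepOuter lenA lenB i carry d rest (w, m) a).1 = pstepOuter lenA lenB i carry d rest w a ∧
            GoodA digits (stepOuter lenA lenB i carry d rest (w, m) a).2 := by
          intro a _ w m hm
          apply pv_fold_sim (GoodA digits) _ _ _ ?_ w m hm
          intro b _ w' m' hm'
          have hr := dfsA_sim digits rest lenA lenB (i + 1)
            (PySem.Int.floordiv (a + b + carry) 10) m' (by omega) hrest hm'
          unfold stepInner pstepInner
          by_cases hc : PySem.Int.mod (a + b + carry) 10 = d
          · simp only [if_pos hc]
            exact ⟨by rw [hr.1], hr.2⟩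
          · simp only [if_neg hc]
            exact ⟨by trivial, hm'⟩
        have hr := pv_fold_sim (GoodA digits)
          (PySem.List.pyRange (if i < lenA then 1 else 0) ((if i < lenA then 9 else 0) + 1) 1)
          (stepOuter lenA lenB i carry d rest) (pstepOuter lenA lenB i carry d rest)
          hstep 0 memo hg
        have hpure : List.foldl (pstepOuter lenA lenB i carry d rest) 0
            (PySem.List.pyRange (if i < lenA then 1 else 0) ((if i < lenA then 9 else 0) + 1) 1)
            = dfsPure lenA lenB (d :: rest) i carry := by
          simp only [dfsPure]
          unfold pstepOuter pstepInner
          rfl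
        simp only [dfsA, hget]
        refine ⟨hr.1.trans hpure, ?_⟩
        intro j c la lb v' hv'
        rw [PySem.Dict.get?_insert] at hv'
        by_cases hk : (j, c, la, lb) = (i, carry, lenA, lenB)
        · rw [if_pos hk] at hv'
          obtain ⟨rfl, rfl, rfl, rfl⟩ : j = i ∧ c = carry ∧ la = lenA ∧ lb = lenB := by
            injection hk with h1 h2; injection h2 with h2 h3; injection h3 with h3 h4
            exact ⟨h1, h2, h3, h4⟩
          rw [← hds]
          rw [← hpure, ← hr.1]
          exact (Option.some_injective _ hv').symm
        · rw [if_neg hk] at hv'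
          exact hr.2 j c la lb v' hv'
      · simp only [dfsA, hget]
        exact ⟨by rw [hds]; exact hg i carry lenA lenB v hget, hg⟩
lemma pv_fold_if_sum {α : Type} (l : List α) (P : α → Prop) [DecidablePred P] (g : α → Int) (init : Int) :
    l.foldl (fun acc x => if P x then acc + g x else acc) init
      = init + (l.map (fun x => if P x then g x else 0)).sum := by
  have h : (fun (acc : Int) x => if P x then acc + g x else acc)
       = (fun acc x => acc + (if P x then g x else 0)) := by
    funext acc x; split_ifs <;> simp
  rw [h, PySem.List.foldl_add]

lemma dfs_eq_dp (lenA lenB : Int) :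
    ∀ (ds : List Int) (i carry : Int), carry = 0 ∨ carry = 1 →
      dfsPure lenA lenB ds i carry =
        (if carry = 0 then (dpRunB lenA lenB ds i).1 else (dpRunB lenA lenB ds i).2)
  | [], i, carry, hc => by
      rcases hc with h | h <;> simp [dfsPure, dpRunB, h]
  | d :: rest, i, carry, hc => by
      have key : ∀ (c : Int), (c = 0 ∨ c = 1) → ∀ (lo hi lo' hi' : Int),
          0 ≤ lo → hi ≤ 9 → 0 ≤ lo' → hi' ≤ 9 →
          (PySem.List.pyRange lo (hi + 1) 1).foldl (fun ways a =>
            (PySem.List.pyRange lo' (hi' + 1) 1).foldl (fun ways b =>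
              if PySem.Int.mod (a + b + c) 10 = d then
                ways + dfsPure lenA lenB rest (i + 1) (PySem.Int.floordiv (a + b + c) 10)
              else ways) ways) 0
          = waysB lo hi lo' hi' d c (dpRunB lenA lenB rest (i + 1)) := by
        intro c hcc lo hi lo' hi' hlo hhi hlo' hhi'
        unfold waysB
        have hinner : (fun (ways a : Int) =>
            (PySem.List.pyRange lo' (hi' + 1) 1).foldl (fun ways b =>
              if PySem.Int.mod (a + b + c) 10 = d then
                ways + dfsPure lenA lenB rest (i + 1) (PySem.Int.floordiv (a + b + c) 10)
              else ways) ways)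
            = (fun ways a => ways + ((PySem.List.pyRange lo' (hi' + 1) 1).map (fun b =>
                if PySem.Int.mod (a + b + c) 10 = d then
                  dfsPure lenA lenB rest (i + 1) (PySem.Int.floordiv (a + b + c) 10)
                else 0)).sum) := by
          funext ways a
          exact pv_fold_if_sum _ _ _ _
        rw [hinner, PySem.List.foldl_add]
        rw [Int.zero_add]
        apply congrArg List.sum
        apply List.map_congr_left
        intro a ha
        apply congrArg List.sum
        apply List.map_congr_left
        intro b hb
        rw [PySem.List.mem_pyRange_one] at ha hb
        by_cases hm : PySem.Int.mod (a + b + c) 10 = d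
        · rw [if_pos hm, if_pos hm]
          have hfd : PySem.Int.floordiv (a + b + c) 10 = (a + b + c) / 10 :=
            PySem.Int.floordiv_eq_ediv_of_pos (by norm_num)
          have hq : PySem.Int.floordiv (a + b + c) 10 = 0 ∨ PySem.Int.floordiv (a + b + c) 10 = 1 := by
            rw [hfd]; omega
          rw [dfs_eq_dp lenA lenB rest (i + 1) _ hq]
        · rw [if_neg hm, if_neg hm]
      rcases hc with h | h <;> subst h <;>
        simp only [dfsPure, dpRunB, if_pos] <;>
      · exact key _ (by norm_num) _ _ _ _ (by split_ifs <;> norm_num) (by split_ifs <;> norm_num)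
          (by split_ifs <;> norm_num) (by split_ifs <;> norm_num)

lemma pv_glue (digits : List Int) (m : Int) :
    (PySem.List.pyRange 1 m 1).foldl (fun res la =>
      (PySem.List.pyRange 1 m 1).foldl (fun res lb => res + dfsPure la lb digits 0 0) res) 0
    = ((PySem.List.pyRange 1 m 1).map (fun la =>
        ((PySem.List.pyRange 1 m 1).map (fun lb => (dpRunB la lb digits 0).1)).sum)).sum := by
  have hone : ∀ la lb : Int, dfsPure la lb digits 0 0 = (dpRunB la lb digits 0).1 := by
    intro la lb
    simpa using dfs_eq_dp la lb digits 0 0 (Or.inl rfl)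
  have hstep : (fun (res la : Int) =>
      (PySem.List.pyRange 1 m 1).foldl (fun res lb => res + dfsPure la lb digits 0 0) res)
      = (fun res la => res + ((PySem.List.pyRange 1 m 1).map (fun lb => (dpRunB la lb digits 0).1)).sum) := by
    funext res la
    rw [PySem.List.foldl_add (g := fun lb => dfsPure la lb digits 0 0)]
    congr 1
    exact congrArg List.sum (List.map_congr_left (fun lb _ => hone la lb))
  rw [hstep, PySem.List.foldl_add, Int.zero_add]

lemma pv_top (digits : List Int) (m : Int) :
    ((PySem.List.pyRange 1 m 1).foldl (fun st lenA =>
      (PySem.List.pyRange 1 m 1).foldl (fun st lenB =>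
        let vm := dfsA lenA lenB digits 0 0 st.2
        (st.1 + vm.1, vm.2)) st) ((0 : Int), PySem.Dict.empty)).1
    = ((PySem.List.pyRange 1 m 1).map (fun la =>
        ((PySem.List.pyRange 1 m 1).map (fun lb => (dpRunB la lb digits 0).1)).sum)).sum := by
  have hempty : GoodA digits PySem.Dict.empty := by
    intro j c la lb v hv
    rw [PySem.Dict.get?_empty] at hv
    cases hv
  have hstep : ∀ la ∈ PySem.List.pyRange 1 m 1, ∀ w mm, GoodA digits mm →
      (((PySem.List.pyRange 1 m 1).foldl (fun st lenB =>
          ((st : Int × _).1 + (dfsA la lenB digits 0 0 st.2).1, (dfsA la lenB digits 0 0 st.2).2)) (w, mm))).1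
        = (PySem.List.pyRange 1 m 1).foldl (fun w lb => w + dfsPure la lb digits 0 0) w ∧
      GoodA digits (((PySem.List.pyRange 1 m 1).foldl (fun st lenB =>
          ((st : Int × _).1 + (dfsA la lenB digits 0 0 st.2).1, (dfsA la lenB digits 0 0 st.2).2)) (w, mm))).2 := by
    intro la _ w mm hm
    apply pv_fold_sim (GoodA digits) _ _ _ ?_ w mm hm
    intro lb _ w' m' hm'
    have hs := dfsA_sim digits digits la lb 0 0 m' (by norm_num) (by simp) hm'
    exact ⟨show w' + (dfsA la lb digits 0 0 m').1 = w' + dfsPure la lb digits 0 0 by rw [hs.1], hs.2⟩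
  have h := pv_fold_sim (GoodA digits) (PySem.List.pyRange 1 m 1)
    (fun st la => (PySem.List.pyRange 1 m 1).foldl (fun st lenB =>
      ((st : Int × _).1 + (dfsA la lenB digits 0 0 st.2).1, (dfsA la lenB digits 0 0 st.2).2)) st)
    (fun w la => (PySem.List.pyRange 1 m 1).foldl (fun w lb => w + dfsPure la lb digits 0 0) w)
    hstep 0 PySem.Dict.empty hempty
  exact h.1.trans (pv_glue digits m)

theorem pv_main : ∀ (n : Int), countNoZeroPairs n = countNoZeroPairs_alt n := by
  intro n
  exact pv_top ((PySem.Int.toChars n).reverse.map pvDigitVal)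
    (((PySem.Int.toChars n).length : Int) + 1)

-- ===== VERDICT (by name: the statement is the Claim_ definition above) =====
theorem countNoZeroPairs_spec : Claim_equal_countNoZeroPairs := by
  intro n _ _
  unfold Spec_countNoZeroPairs
  exact pv_main n
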